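-- pv_equiv track=rewrite | github.com/calebgp/topas | 2019/b.py | calc_locked_drawers
-- ===== SOURCE A (Python) =====
-- def calc_locked_drawers(drawers):
--     locked_drawers = 0
--     for i in range(len(drawers)):
--
--         drawer = drawers[i]
--         if i != 0:
--             previous_drawer = drawers[i - 1]
--         else:
--             previous_drawer = ""
--         if previous_drawer == "#" or drawer == "#":
--             locked_drawers += 1
--     return locked_drawers
-- ===== SOURCE B (Python) =====
-- def calc_locked_drawers(drawers):
--     n = len(drawers)
--     covered = set()
--     for j, d in enumerate(drawers):
--         if d == "#":
--             covered.add(j)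
--             if j + 1 < n:
--                 covered.add(j + 1)
--     return len(covered)
-- ===== Notes on version B (the rewrite author's own statement) =====
-- stated objective: alternative
-- what changed: Replaces the per-index counter that re-reads each drawer and its predecessor with a single enumerate pass that, only at '#' drawers, inserts the covered indices j and j+1 (bounded by the length) into a set and returns its size.
import Mathlib
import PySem

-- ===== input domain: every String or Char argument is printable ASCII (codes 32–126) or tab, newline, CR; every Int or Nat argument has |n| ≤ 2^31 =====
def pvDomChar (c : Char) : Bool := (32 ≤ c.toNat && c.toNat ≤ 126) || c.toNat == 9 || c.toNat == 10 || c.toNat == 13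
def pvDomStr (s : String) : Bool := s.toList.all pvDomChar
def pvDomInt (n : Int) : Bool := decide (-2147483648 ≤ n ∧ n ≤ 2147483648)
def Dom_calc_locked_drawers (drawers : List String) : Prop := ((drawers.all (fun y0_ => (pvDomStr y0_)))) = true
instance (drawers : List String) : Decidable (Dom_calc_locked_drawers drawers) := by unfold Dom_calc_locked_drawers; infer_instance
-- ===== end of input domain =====

-- B replaces A's per-index counter (reading each drawer and its predecessor) by one enumerate
-- pass that inserts, only at '#' drawers, the covered indices j and j+1 into a set: alternative decomposition, same cost.

-- ===== PORT A =====
def calc_locked_drawers (drawers : List String) : Int :=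
  (PySem.List.pyRange 0 (PySem.List.len drawers) 1).foldl (fun locked_drawers i =>
    let drawer := PySem.List.pyGetD drawers i ""
    let previous_drawer := if i ≠ 0 then PySem.List.pyGetD drawers (i - 1) "" else ""
    if previous_drawer = "#" ∨ drawer = "#" then locked_drawers + 1 else locked_drawers) 0

-- ===== PORT B =====
def calc_locked_drawers_alt (drawers : List String) : Int :=
  let n : Int := PySem.List.len drawers
  let covered : PySem.Set Int := (PySem.List.enumerate drawers).foldl (fun s p =>
    if p.2 = "#" then
      let s' := PySem.Set.add s p.1
      if p.1 + 1 < n then PySem.Set.add s' (p.1 + 1) else s'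
    else s) PySem.Set.empty
  PySem.Set.len covered

-- ===== PRECONDITION & SPEC =====
def Spec_calc_locked_drawers (drawers : List String) (out : Int) : Prop := out = calc_locked_drawers_alt drawers
instance (drawers : List String) (out : Int) : Decidable (Spec_calc_locked_drawers drawers out) := by unfold Spec_calc_locked_drawers; infer_instance

-- ===== CLAIM (what is proved, stated in full; the proofs are below) =====
def Claim_equal_calc_locked_drawers : Prop := ∀ (drawers : List String), Dom_calc_locked_drawers drawers → Spec_calc_locked_drawers drawers (calc_locked_drawers drawers)

-- ===== LEMMAS AND PROOFS =====

-- the per-index condition A tests, as a Bool predicate on the index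
def pvCond (drawers : List String) (i : Int) : Bool :=
  decide ((if i ≠ 0 then PySem.List.pyGetD drawers (i - 1) "" else "") = "#"
          ∨ PySem.List.pyGetD drawers i "" = "#")

-- B's fold step
def pvStep (n : Int) (s : PySem.Set Int) (p : Int × String) : PySem.Set Int :=
  if p.2 = "#" then
    let s' := PySem.Set.add s p.1
    if p.1 + 1 < n then PySem.Set.add s' (p.1 + 1) else s'
  else s

lemma A_eq_filter (drawers : List String) :
    calc_locked_drawers drawers
      = ((PySem.List.pyRange 0 (PySem.List.len drawers) 1).filter (pvCond drawers)).length := by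
  unfold calc_locked_drawers
  have h : (fun (locked_drawers : Int) (i : Int) =>
      let drawer := PySem.List.pyGetD drawers i ""
      let previous_drawer := if i ≠ 0 then PySem.List.pyGetD drawers (i - 1) "" else ""
      if previous_drawer = "#" ∨ drawer = "#" then locked_drawers + 1 else locked_drawers)
      = (fun (acc : Int) (i : Int) => if pvCond drawers i = true then acc + 1 else acc) := by
    funext acc i
    simp [pvCond]
  rw [h, PySem.List.foldl_count_if, List.countP_eq_length_filter]
  simp

lemma B_fold_mem (n : Int) (l : List (Int × String)) (s : PySem.Set Int) (y : Int) :
    y ∈ l.foldl (pvStep n) s ↔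
      y ∈ s ∨ ∃ p ∈ l, p.2 = "#" ∧ (y = p.1 ∨ (y = p.1 + 1 ∧ p.1 + 1 < n)) := by
  induction l generalizing s with
  | nil => simp
  | cons q l ih =>
    simp only [List.foldl_cons, ih, pvStep]
    split_ifs with hq hlt
    · simp [PySem.Set.mem_add, hq, hlt, or_assoc]
    · simp [PySem.Set.mem_add, hq, hlt, or_assoc]
    · constructor
      · rintro h; exact h.imp_right fun ⟨p, hp, h2, h3⟩ => ⟨p, List.mem_cons_of_mem _ hp, h2, h3⟩
      · rintro (h | ⟨p, hp, h2, h3⟩)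
        · exact Or.inl h
        · rcases List.mem_cons.1 hp with rfl | hp
          · exact absurd h2 hq
          · exact Or.inr ⟨p, hp, h2, h3⟩

lemma B_fold_nodup (n : Int) (l : List (Int × String)) (s : PySem.Set Int)
    (hs : s.Nodup) : (l.foldl (pvStep n) s).Nodup := by
  induction l generalizing s with
  | nil => exact hs
  | cons q l ih =>
    apply ih
    unfold pvStep
    split_ifs <;> first
      | exact PySem.Set.nodup_add _ _ (PySem.Set.nodup_add _ _ hs)
      | exact PySem.Set.nodup_add _ _ hs
      | exact hs

lemma covered_mem_iff (drawers : List String) (y : Int) :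
    (y ∈ (PySem.List.enumerate drawers).foldl (pvStep (PySem.List.len drawers)) PySem.Set.empty)
      ↔ y ∈ (PySem.List.pyRange 0 (PySem.List.len drawers) 1).filter (pvCond drawers) := by
  rw [B_fold_mem]
  simp only [PySem.Set.empty, List.not_mem_nil, false_or, List.mem_filter,
    PySem.List.mem_pyRange_one, PySem.List.len_eq]
  constructor
  · rintro ⟨p, hp, hhash, hy⟩
    rcases (PySem.List.mem_enumerate_iff _ _ _).1 hp with ⟨k, hk, rfl⟩
    simp only [zero_add] at hhash hy ⊢
    rcases hy with rfl | ⟨rfl, hlt⟩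
    · refine ⟨⟨by positivity, by exact_mod_cast hk⟩, ?_⟩
      simp only [pvCond, decide_eq_true_eq]
      right
      simp [PySem.List.pyGetD_natCast, List.getD, List.getElem?_eq_getElem hk, hhash]
    · refine ⟨⟨by positivity, by exact_mod_cast hlt⟩, ?_⟩
      simp only [pvCond, decide_eq_true_eq]
      left
      rw [if_pos (by omega)]
      simp [show (k : Int) + 1 - 1 = (k : Int) by ring, PySem.List.pyGetD_natCast,
        List.getD, List.getElem?_eq_getElem hk, hhash]
  · rintro ⟨⟨hy0, hyn⟩, hc⟩
    simp only [pvCond, decide_eq_true_eq] at hc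
    rcases hc with hprev | hcur
    · have hyne : y ≠ 0 := by
        intro h; subst h; simp at hprev
      rw [if_pos hyne] at hprev
      obtain ⟨k, rfl⟩ : ∃ k : Nat, y = (k : Int) + 1 := ⟨(y - 1).toNat, by omega⟩
      have hk : k < drawers.length := by omega
      refine ⟨((k : Int), drawers[k]), ?_, ?_, ?_⟩
      · exact (PySem.List.mem_enumerate_iff _ _ _).2 ⟨k, hk, by simp⟩
      · have : (k : Int) + 1 - 1 = (k : Int) := by ring
        rw [this] at hprev
        simpa [PySem.List.pyGetD_natCast, List.getD, List.getElem?_eq_getElem hk] using hprev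
      · right; exact ⟨rfl, by simpa using hyn⟩
    · obtain ⟨k, rfl⟩ : ∃ k : Nat, y = (k : Int) := ⟨y.toNat, by omega⟩
      have hk : k < drawers.length := by exact_mod_cast hyn
      refine ⟨((k : Int), drawers[k]), ?_, ?_, Or.inl rfl⟩
      · exact (PySem.List.mem_enumerate_iff _ _ _).2 ⟨k, hk, by simp⟩
      · simpa [PySem.List.pyGetD_natCast, List.getD, List.getElem?_eq_getElem hk] using hcur

lemma B_eq_filter (drawers : List String) :
    calc_locked_drawers_alt drawers
      = ((PySem.List.pyRange 0 (PySem.List.len drawers) 1).filter (pvCond drawers)).length := by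
  unfold calc_locked_drawers_alt
  simp only [PySem.Set.len]
  have hstep : (fun (s : PySem.Set Int) (p : Int × String) =>
      if p.2 = "#" then
        let s' := PySem.Set.add s p.1
        if p.1 + 1 < PySem.List.len drawers then PySem.Set.add s' (p.1 + 1) else s'
      else s) = pvStep (PySem.List.len drawers) := by
    funext s p; rfl
  rw [hstep]
  have hperm :
      ((PySem.List.enumerate drawers).foldl (pvStep (PySem.List.len drawers)) PySem.Set.empty).Perm
        ((PySem.List.pyRange 0 (PySem.List.len drawers) 1).filter (pvCond drawers)) := by
    refine (List.perm_ext_iff_of_nodup ?_ ?_).2 (fun y => covered_mem_iff drawers y)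
    · exact B_fold_nodup _ _ _ (by simp [PySem.Set.empty])
    · exact (PySem.List.nodup_pyRange_one 0 _).filter _
  exact congrArg _ hperm.length_eq

-- ===== VERDICT (by name: the statement is the Claim_ definition above) =====
theorem calc_locked_drawers_spec : Claim_equal_calc_locked_drawers := by
  intro drawers _
  unfold Spec_calc_locked_drawers
  rw [A_eq_filter, B_eq_filter]
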